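-- pv_equiv track=rewrite | github.com/Jolanpn/Project-Python-CHATBOT | fonctions.py | clean_char_str
-- ===== SOURCE A (Python) =====
-- def clean_char_str(new_text):
--   L = {
--       ":": "",
--       ";": "",
--       ",": "",
--       "!": "",
--       '"': "",
--       "?": "",
--       "(": "",
--       ")": "",
--       ".": "",
--       "-": " ",
--       "'": " "
--   }
--   # remplacement des caractères
--   for i, j in L.items():
--     new_text = new_text.replace(i, j)
--   return new_text
-- ===== SOURCE B (Python) =====
-- def clean_char_str(new_text):
--   L = {
--       ":": "",
--       ";": "",
--       ",": "",
--       "!": "",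
--       '"': "",
--       "?": "",
--       "(": "",
--       ")": "",
--       ".": "",
--       "-": " ",
--       "'": " "
--   }
--   # single pass: map each character through the table (unmapped chars stay)
--   return ''.join(L.get(c, c) for c in new_text)
-- ===== Notes on version B (the rewrite author's own statement) =====
-- stated objective: alternative
-- what changed: Replaces the eleven sequential .replace passes over the string with a single pass that maps each character through the table via L.get(c, c) and joins the results; it trades A's eleven C-level scans for one Python-level scan.
import Mathlib
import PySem

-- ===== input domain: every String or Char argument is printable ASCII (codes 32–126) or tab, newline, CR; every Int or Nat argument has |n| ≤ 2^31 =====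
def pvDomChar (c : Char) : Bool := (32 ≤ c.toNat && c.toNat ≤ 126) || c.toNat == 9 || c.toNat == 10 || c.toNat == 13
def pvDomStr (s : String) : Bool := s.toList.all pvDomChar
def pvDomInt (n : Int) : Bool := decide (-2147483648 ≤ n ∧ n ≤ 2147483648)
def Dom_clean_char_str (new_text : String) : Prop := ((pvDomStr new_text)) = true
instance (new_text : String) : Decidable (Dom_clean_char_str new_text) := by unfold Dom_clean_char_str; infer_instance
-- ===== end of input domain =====

-- B replaces A's eleven sequential .replace passes with one single pass mapping each
-- character through the table; the outputs are identical.

-- ===== PORT A =====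
-- the dict L, as an association list in insertion order (Python iterates it in this order)
def cleanItems : List (String × String) :=
  [(":", ""), (";", ""), (",", ""), ("!", ""), ("\"", ""), ("?", ""),
   ("(", ""), (")", ""), (".", ""), ("-", " "), ("'", " ")]

-- for i, j in L.items(): new_text = new_text.replace(i, j)
def clean_char_str (new_text : String) : String :=
  (PySem.Dict.mk cleanItems).items.foldl (fun t p => PySem.Str.replace t p.1 p.2) new_text

-- ===== PORT B =====
-- the same table L, keyed by its (single-character) keys
def cleanTable : PySem.Dict Char String :=
  PySem.Dict.mk
    [(':', ""), (';', ""), (',', ""), ('!', ""), ('"', ""), ('?', ""),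
     ('(', ""), (')', ""), ('.', ""), ('-', " "), ('\'', " ")]

-- ''.join(L.get(c, c) for c in new_text)
def clean_char_str_alt (new_text : String) : String :=
  PySem.Str.join "" (new_text.toList.map (fun c => cleanTable.getD c (String.ofList [c])))

-- ===== PRECONDITION & SPEC =====
def Spec_clean_char_str (new_text : String) (out : String) : Prop := out = clean_char_str_alt new_text
instance (new_text : String) (out : String) : Decidable (Spec_clean_char_str new_text out) := by unfold Spec_clean_char_str; infer_instance

-- ===== CLAIM (what is proved, stated in full; the proofs are below) =====
def Claim_equal_clean_char_str : Prop := ∀ (new_text : String), Dom_clean_char_str new_text → Spec_clean_char_str new_text (clean_char_str new_text)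

-- ===== LEMMAS AND PROOFS =====

-- the per-character transformation both programs compute
def cleanF (c : Char) : List Char :=
  if c = ':' then [] else if c = ';' then [] else if c = ',' then [] else
  if c = '!' then [] else if c = '"' then [] else if c = '?' then [] else
  if c = '(' then [] else if c = ')' then [] else if c = '.' then [] else
  if c = '-' then [' '] else if c = '\'' then [' '] else [c]

theorem replace_go_single (o : Char) (new : List Char) :
    ∀ (fuel : Nat) (l acc : List Char), l.length ≤ fuel →
      PySem.Chars.replace.go [o] new fuel l acc
        = acc.reverse ++ l.flatMap (fun c => if c = o then new else [c]) := by
  intro fuel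
  induction fuel with
  | zero => intro l acc h; simp at h; subst h; simp [PySem.Chars.replace.go]
  | succ n ih =>
    intro l acc h
    cases l with
    | nil => simp [PySem.Chars.replace.go]
    | cons c t =>
      rw [PySem.Chars.replace.go]
      by_cases hc : c = o
      · subst hc
        simp [List.isPrefixOf, ih t _ (by simpa using Nat.le_of_succ_le_succ h)]
      · simp [List.isPrefixOf, hc, ih t _ (by simpa using Nat.le_of_succ_le_succ h)]
        exact fun h' => absurd h'.symm hc

-- Python's s.replace(o, n) for a one-character o is a per-character flatMap
theorem replace_single (l : List Char) (o : Char) (new : List Char) :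
    PySem.Chars.replace l [o] new = l.flatMap (fun c => if c = o then new else [c]) := by
  rw [PySem.Chars.replace]
  simp [replace_go_single o new l.length l [] (le_refl _)]

-- A's eleven passes collapse (by flatMap associativity) into the single map cleanF
set_option maxHeartbeats 2000000 in
theorem clean_A_toList (s : String) :
    (clean_char_str s).toList = s.toList.flatMap cleanF := by
  simp only [clean_char_str, cleanItems, List.foldl, PySem.Str.toList_replace,
    show (":" : String).toList = [':'] from rfl,
    show (";" : String).toList = [';'] from rfl,
    show ("," : String).toList = [','] from rfl,
    show ("!" : String).toList = ['!'] from rfl,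
    show ("\"" : String).toList = ['"'] from rfl,
    show ("?" : String).toList = ['?'] from rfl,
    show ("(" : String).toList = ['('] from rfl,
    show (")" : String).toList = [')'] from rfl,
    show ("." : String).toList = ['.'] from rfl,
    show ("-" : String).toList = ['-'] from rfl,
    show ("'" : String).toList = ['\''] from rfl,
    show ("" : String).toList = [] from rfl,
    show (" " : String).toList = [' '] from rfl,
    replace_single, List.flatMap_assoc]
  congr 1
  funext c
  unfold cleanF
  split_ifs with h1 h2 h3 h4 h5 h6 h7 h8 h9 h10 h11 <;> simp_all

theorem join_empty_sep (css : List (List Char)) : PySem.Chars.join [] css = css.flatten := by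
  show List.intercalate [] css = css.flatten
  rw [List.intercalate]
  induction css with
  | nil => simp
  | cons c t ih => cases t <;> simp_all [List.intersperse]

-- B's table lookup computes cleanF on every character
set_option maxHeartbeats 1600000 in
theorem table_char (c : Char) : (cleanTable.getD c (String.ofList [c])).toList = cleanF c := by
  unfold cleanF
  split_ifs with h1 h2 h3 h4 h5 h6 h7 h8 h9 h10 h11
  · subst h1; rfl
  · subst h2; rfl
  · subst h3; rfl
  · subst h4; rfl
  · subst h5; rfl
  · subst h6; rfl
  · subst h7; rfl
  · subst h8; rfl
  · subst h9; rfl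
  · subst h10; rfl
  · subst h11; rfl
  · rw [PySem.Dict.getD_eq_get?_getD]
    simp only [cleanTable, PySem.Dict.get?_mk_cons,
      beq_eq_false_iff_ne.mpr (Ne.symm h1), beq_eq_false_iff_ne.mpr (Ne.symm h2),
      beq_eq_false_iff_ne.mpr (Ne.symm h3), beq_eq_false_iff_ne.mpr (Ne.symm h4),
      beq_eq_false_iff_ne.mpr (Ne.symm h5), beq_eq_false_iff_ne.mpr (Ne.symm h6),
      beq_eq_false_iff_ne.mpr (Ne.symm h7), beq_eq_false_iff_ne.mpr (Ne.symm h8),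
      beq_eq_false_iff_ne.mpr (Ne.symm h9), beq_eq_false_iff_ne.mpr (Ne.symm h10),
      beq_eq_false_iff_ne.mpr (Ne.symm h11)]
    simp [PySem.Dict.get?]

-- B's single pass, character by character
theorem clean_B_toList (s : String) :
    (clean_char_str_alt s).toList = s.toList.flatMap cleanF := by
  simp only [clean_char_str_alt, PySem.Str.toList_join, List.map_map,
    show ("" : String).toList = [] from rfl, join_empty_sep, List.flatMap]
  congr 1
  apply List.map_congr_left
  intro c _
  exact table_char c

-- ===== VERDICT (by name: the statement is the Claim_ definition above) =====
theorem clean_char_str_spec : Claim_equal_clean_char_str := by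
  intro s _
  unfold Spec_clean_char_str
  exact String.toList_inj.mp (by rw [clean_A_toList, clean_B_toList])
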